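-- pv_equiv track=rewrite | github.com/sboluda/Algorithms_Biology | P1/compare_sequences/ini_move_seq2.py | move_seq2
-- ===== SOURCE A (Python) =====
-- def move_seq2(seq1, seq2):
--     """
--     >>> move_seq2("THEFASTCAT", "THEFATCAT")
--     ['THEFASTCAT---------', 'THEFATCAT----------', '-THEFATCAT---------', '--THEFATCAT--------', '---THEFATCAT-------', '----THEFATCAT------', '-----THEFATCAT-----', '------THEFATCAT----', '-------THEFATCAT---', '--------THEFATCAT--', '---------THEFATCAT-', '----------THEFATCAT']
--     >>> move_seq2("THEFASTCAT", "AFASTCAT")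
--     ['THEFASTCAT--------', 'AFASTCAT----------', '-AFASTCAT---------', '--AFASTCAT--------', '---AFASTCAT-------', '----AFASTCAT------', '-----AFASTCAT-----', '------AFASTCAT----', '-------AFASTCAT---', '--------AFASTCAT--', '---------AFASTCAT-', '----------AFASTCAT']
--     >>> move_seq2("THEFASTCAT", "THECAT")
--     ['THEFASTCAT------', 'THECAT----------', '-THECAT---------', '--THECAT--------', '---THECAT-------', '----THECAT------', '-----THECAT-----', '------THECAT----', '-------THECAT---', '--------THECAT--', '---------THECAT-', '----------THECAT']
--     """
--     assert len(seq1) != len(seq2)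
--
--     if len(seq1) > len(seq2):
--         largest_alignment, moving_seq = seq1, seq2
--     else:
--         largest_alignment, moving_seq = seq2, seq1
--
--     num_dashes = len(largest_alignment)
--     full_seq = largest_alignment + "-"*len(moving_seq)
--     movements = [full_seq] + ["-"*i + moving_seq + "-"*(num_dashes-i)
--                               for i in range(len(full_seq) - len(moving_seq) + 1)]
--
--     return movements
-- ===== SOURCE B (Python) =====
-- def move_seq2(seq1, seq2):
--     assert len(seq1) != len(seq2)
--     largest, moving = (seq1, seq2) if len(seq1) > len(seq2) else (seq2, seq1)
--     n = len(largest)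
--     pad = "-" * n
--     template = pad + moving + pad
--     width = n + len(moving)
--     result = [largest + "-" * len(moving)]
--     for i in range(n + 1):
--         start = n - i
--         result.append(template[start:start + width])
--     return result
-- ===== Notes on version B (the rewrite author's own statement) =====
-- stated objective: alternative
-- what changed: B builds one dash-padded template string once and extracts every alignment row as a fixed-width slice at a sliding start index, instead of concatenating fresh dash strings for each row as A does.
import Mathlib
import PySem

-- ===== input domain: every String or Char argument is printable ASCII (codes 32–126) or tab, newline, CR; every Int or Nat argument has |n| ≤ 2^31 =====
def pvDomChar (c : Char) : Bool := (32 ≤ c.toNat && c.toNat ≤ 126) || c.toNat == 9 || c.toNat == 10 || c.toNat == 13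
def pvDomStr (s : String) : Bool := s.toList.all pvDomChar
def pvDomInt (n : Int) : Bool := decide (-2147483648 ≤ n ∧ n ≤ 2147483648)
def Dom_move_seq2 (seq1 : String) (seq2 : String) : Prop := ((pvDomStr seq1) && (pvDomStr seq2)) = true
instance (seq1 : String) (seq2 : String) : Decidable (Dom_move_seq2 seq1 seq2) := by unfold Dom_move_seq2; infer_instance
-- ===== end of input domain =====

-- B builds one dash-padded template and slices fixed-width windows at a sliding start,
-- instead of concatenating fresh dash strings per row (alternative decomposition, similar cost).


-- ===== PORT A =====
-- literal port of A on code-point lists ("-"*k is List.replicate k '-'; str concat is ++)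
def move_seq2 (seq1 : String) (seq2 : String) : List String :=
  let s1 := seq1.toList
  let s2 := seq2.toList
  let lm := if s1.length > s2.length then (s1, s2) else (s2, s1)
  let largest := lm.1
  let moving := lm.2
  let numDashes := largest.length
  let fullSeq := largest ++ List.replicate moving.length '-'
  String.ofList fullSeq ::
    (List.range (fullSeq.length - moving.length + 1)).map
      (fun i => String.ofList (List.replicate i '-' ++ moving ++ List.replicate (numDashes - i) '-'))

-- ===== PORT B =====
-- literal port of B: template[start:start+width] is PySem.List.slice on the code points
def move_seq2_alt (seq1 : String) (seq2 : String) : List String :=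
  let s1 := seq1.toList
  let s2 := seq2.toList
  let lm := if s1.length > s2.length then (s1, s2) else (s2, s1)
  let largest := lm.1
  let moving := lm.2
  let n := largest.length
  let pad := List.replicate n '-'
  let template := pad ++ moving ++ pad
  let width := n + moving.length
  (List.range (n + 1)).foldl
    (fun (acc : List String) (i : Nat) =>
      acc ++ [String.ofList (PySem.List.slice template
        (some ((n : Int) - (i : Int))) (some ((n : Int) - (i : Int) + (width : Int))))])
    [String.ofList (largest ++ List.replicate moving.length '-')]

-- ===== PRECONDITION & SPEC =====
-- A's assert raises AssertionError when the two sequences have equal length; Pre_ excludes exactly that.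
def Pre_move_seq2 (seq1 : String) (seq2 : String) : Prop := seq1.toList.length ≠ seq2.toList.length
instance (seq1 : String) (seq2 : String) : Decidable (Pre_move_seq2 seq1 seq2) := by unfold Pre_move_seq2; infer_instance
def pvWitness_move_seq2 : String × String := ("ab", "a")
def Spec_move_seq2 (seq1 : String) (seq2 : String) (out : List String) : Prop := out = move_seq2_alt seq1 seq2
instance (seq1 : String) (seq2 : String) (out : List String) : Decidable (Spec_move_seq2 seq1 seq2 out) := by unfold Spec_move_seq2; infer_instance

-- ===== CLAIM (what is proved, stated in full; the proofs are below) =====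
def Claim_equal_move_seq2 : Prop := ∀ (seq1 : String) (seq2 : String), Dom_move_seq2 seq1 seq2 → Pre_move_seq2 seq1 seq2 → Spec_move_seq2 seq1 seq2 (move_seq2 seq1 seq2)

-- ===== LEMMAS AND PROOFS =====

-- the slice B takes out of the template equals the row A concatenates, for i ≤ n
lemma slice_window (moving : List Char) (n i : Nat) (hi : i ≤ n) :
    PySem.List.slice (List.replicate n '-' ++ moving ++ List.replicate n '-')
      (some ((n : Int) - (i : Int))) (some ((n : Int) - (i : Int) + ((n + moving.length : Nat) : Int)))
    = List.replicate i '-' ++ moving ++ List.replicate (n - i) '-' := by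
  have h1 : ((n : Int) - (i : Int)) = (((n - i : Nat) : Int)) := by omega
  rw [h1, PySem.List.slice_natCast_add,
      List.drop_append_of_le_length (by simp; omega),
      List.drop_append_of_le_length (by simp), List.drop_replicate]
  have h2 : n - (n - i) = i := by omega
  rw [h2, List.take_append (l₁ := List.replicate i '-' ++ moving) (l₂ := List.replicate n '-'),
      List.take_of_length_le (by simp; omega)]
  have h3 : n + moving.length - (List.replicate i '-' ++ moving).length = n - i := by simp; omega
  rw [h3, List.take_replicate]
  have h4 : min (n - i) n = n - i := by omega
  rw [h4]

-- core equality for arbitrary largest/moving code-point lists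
lemma core_eq (largest moving : List Char) :
    (String.ofList (largest ++ List.replicate moving.length '-') ::
      (List.range ((largest ++ List.replicate moving.length '-').length - moving.length + 1)).map
        (fun i => String.ofList (List.replicate i '-' ++ moving ++ List.replicate (largest.length - i) '-')))
    = (List.range (largest.length + 1)).foldl
        (fun (acc : List String) (i : Nat) =>
          acc ++ [String.ofList (PySem.List.slice
            (List.replicate largest.length '-' ++ moving ++ List.replicate largest.length '-')
            (some ((largest.length : Int) - (i : Int)))
            (some ((largest.length : Int) - (i : Int) + ((largest.length + moving.length : Nat) : Int))))])
        [String.ofList (largest ++ List.replicate moving.length '-')] := by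
  set n := largest.length with hn
  have hrange : (largest ++ List.replicate moving.length '-').length - moving.length + 1 = n + 1 := by
    simp [hn]
  rw [hrange, PySem.List.foldl_append_singleton_eq_map, List.singleton_append]
  congr 1
  apply List.map_congr_left
  intro i hi
  rw [slice_window moving n i (by have := List.mem_range.mp hi; omega)]

-- ===== VERDICT (by name: the statement is the Claim_ definition above) =====
theorem move_seq2_spec : Claim_equal_move_seq2 := by
  intro seq1 seq2 _ _
  unfold Spec_move_seq2 move_seq2 move_seq2_alt
  by_cases h : seq1.toList.length > seq2.toList.length
  · simp only [if_pos h]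
    exact core_eq _ _
  · simp only [if_neg h]
    exact core_eq _ _
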